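-- pv_equiv track=rewrite | github.com/Osmar-Junior-slz/doutorado-gpp | dockingpp/dockingpp/gui/pages/pdb_prep.py | compute_pdb_counts
-- ===== SOURCE A (Python) =====
-- def compute_pdb_counts(lines: list[str]) -> dict[str, int]:
--     total = len(lines)
--     n_atom = 0
--     n_hetatm = 0
--     for line in lines:
--         record = line[:6].strip().upper()
--         if record == "ATOM":
--             n_atom += 1
--         elif record == "HETATM":
--             n_hetatm += 1
--     return {"total": total, "atom": n_atom, "hetatm": n_hetatm}
-- ===== SOURCE B (Python) =====
-- def compute_pdb_counts(lines: list[str]) -> dict[str, int]: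
--     records = [line[:6].strip().upper() for line in lines]
--     return {"total": len(lines),
--             "atom": records.count("ATOM"),
--             "hetatm": records.count("HETATM")}
-- ===== Notes on version B (the rewrite author's own statement) =====
-- stated objective: idiomatic
-- what changed: Replaces the branch-updating if/elif accumulator loop by a map to normalized record names followed by two list.count lookups, removing the explicit conditional state machine.
import Mathlib
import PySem

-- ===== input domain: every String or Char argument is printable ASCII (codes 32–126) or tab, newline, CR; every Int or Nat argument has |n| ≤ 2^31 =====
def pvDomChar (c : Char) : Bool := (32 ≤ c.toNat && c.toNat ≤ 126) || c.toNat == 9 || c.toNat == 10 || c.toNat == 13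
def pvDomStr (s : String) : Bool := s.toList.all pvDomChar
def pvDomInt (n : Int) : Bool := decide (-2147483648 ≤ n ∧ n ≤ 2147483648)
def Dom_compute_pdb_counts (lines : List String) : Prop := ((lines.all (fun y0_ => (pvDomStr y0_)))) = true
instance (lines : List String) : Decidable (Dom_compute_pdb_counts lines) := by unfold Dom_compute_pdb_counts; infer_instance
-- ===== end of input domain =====

-- B replaces A's if/elif accumulator loop by a map to normalized records plus two counts (idiomatic, same cost).

-- ===== PORT A =====
-- line[:6].strip().upper()
def pvRecord (line : String) : String :=
  PySem.Str.upper (PySem.Str.strip (PySem.Str.slice line none (some 6)))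

def compute_pdb_counts (lines : List String) : List (String × Int) :=
  let total : Int := (lines.length : Int)
  let p := lines.foldl
    (fun (st : Int × Int) line =>
      let record := pvRecord line
      if record = "ATOM" then (st.1 + 1, st.2)
      else if record = "HETATM" then (st.1, st.2 + 1)
      else st)
    (0, 0)
  [("total", total), ("atom", p.1), ("hetatm", p.2)]

-- ===== PORT B =====
def compute_pdb_counts_alt (lines : List String) : List (String × Int) :=
  let records := lines.map pvRecord
  [("total", (lines.length : Int)),
   ("atom", (PySem.List.count records "ATOM" : Int)),
   ("hetatm", (PySem.List.count records "HETATM" : Int))]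

-- ===== PRECONDITION & SPEC =====
def Spec_compute_pdb_counts (lines : List String) (out : List (String × Int)) : Prop := out = compute_pdb_counts_alt lines
instance (lines : List String) (out : List (String × Int)) : Decidable (Spec_compute_pdb_counts lines out) := by unfold Spec_compute_pdb_counts; infer_instance

-- ===== CLAIM (what is proved, stated in full; the proofs are below) =====
def Claim_equal_compute_pdb_counts : Prop := ∀ (lines : List String), Dom_compute_pdb_counts lines → Spec_compute_pdb_counts lines (compute_pdb_counts lines)

-- ===== LEMMAS AND PROOFS =====
theorem pv_fold_counts (lines : List String) (a h : Int) :
    lines.foldl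
      (fun (st : Int × Int) line =>
        let record := pvRecord line
        if record = "ATOM" then (st.1 + 1, st.2)
        else if record = "HETATM" then (st.1, st.2 + 1)
        else st)
      (a, h)
    = (a + ((lines.map pvRecord).count "ATOM" : Int),
       h + ((lines.map pvRecord).count "HETATM" : Int)) := by
  induction lines generalizing a h with
  | nil => simp
  | cons x xs ih =>
    simp only [List.foldl_cons, List.map_cons]
    by_cases hA : pvRecord x = "ATOM"
    · simp [hA, ih]
      omega
    · by_cases hH : pvRecord x = "HETATM"
      · simp [hH, ih]
        omega
      · simp [hA, hH, ih]

-- ===== VERDICT (by name: the statement is the Claim_ definition above) =====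
theorem compute_pdb_counts_spec : Claim_equal_compute_pdb_counts := by
  intro lines _
  unfold Spec_compute_pdb_counts compute_pdb_counts compute_pdb_counts_alt
  simp [pv_fold_counts, PySem.List.count_eq]
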